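-- pv_equiv track=rewrite | github.com/NHSDigital/electronic-prescription-service-api-regression-tests | utils/prescription_id_generator.py | generate_check_digit
-- ===== SOURCE A (Python) =====
-- CHECK_DIGIT_VALUES = "0123456789ABCDEFGHIJKLMNOPQRSTUVWXYZ+"
--
-- def generate_check_digit(prescription_id):
--     formatted_prescription_id = prescription_id.replace("-", "")
--     prescription_id_length = len(formatted_prescription_id)
--     running_total = 0
--     for index, character in enumerate(formatted_prescription_id):
--         running_total += int(character, 36) * 2 ** (prescription_id_length - index)
--     check_value = (38 - (running_total % 37)) % 37
--     check_digit = CHECK_DIGIT_VALUES[check_value]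
--     prescription_id += check_digit
--     return prescription_id
-- ===== SOURCE B (Python) =====
-- CHECK_DIGIT_VALUES = "0123456789ABCDEFGHIJKLMNOPQRSTUVWXYZ+"
--
-- def generate_check_digit(prescription_id):
--     # Horner-style: one pass, constant-size modular accumulator (mod 37), no big powers.
--     total = 0
--     for character in prescription_id:
--         if character != "-":
--             total = (total * 2 + int(character, 36)) % 37
--     check_value = (38 - total * 2 % 37) % 37
--     return prescription_id + CHECK_DIGIT_VALUES[check_value]
-- ===== Notes on version B (the rewrite author's own statement) =====
-- stated objective: faster
-- what changed: Replaces A's loop that computes a huge power 2**(L-index) for every character (quadratic-and-worse big-int work) with a single Horner-style pass keeping a constant-size accumulator reduced mod 37 at each step, skipping '-' inline instead of building a replaced string.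
import Mathlib
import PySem

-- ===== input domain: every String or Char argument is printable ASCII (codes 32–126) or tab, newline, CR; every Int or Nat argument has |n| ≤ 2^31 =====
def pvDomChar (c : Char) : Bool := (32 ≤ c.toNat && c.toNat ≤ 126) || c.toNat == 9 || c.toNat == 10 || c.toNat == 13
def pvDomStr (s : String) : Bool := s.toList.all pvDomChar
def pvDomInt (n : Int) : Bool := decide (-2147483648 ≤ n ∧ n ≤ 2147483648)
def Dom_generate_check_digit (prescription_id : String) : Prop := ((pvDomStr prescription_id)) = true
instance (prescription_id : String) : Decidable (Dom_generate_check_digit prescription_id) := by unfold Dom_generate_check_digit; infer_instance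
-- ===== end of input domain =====

-- B replaces A's per-character big powers 2^(L-i) by a one-pass Horner accumulation mod 37
-- (objective: faster; measured asymptotically faster on the timing inputs).

-- shared helper: value of int(c, 36) for a single base-36 digit character
-- (Python raises ValueError on any other character; those inputs are excluded by Pre_,
--  so the 0 in the final branch is never reached on admitted inputs)
def int36 (c : Char) : Int :=
  if '0' ≤ c ∧ c ≤ '9' then (c.toNat : Int) - 48
  else if 'a' ≤ c ∧ c ≤ 'z' then (c.toNat : Int) - 87
  else if 'A' ≤ c ∧ c ≤ 'Z' then (c.toNat : Int) - 55
  else 0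

def CHECK_DIGIT_VALUES : String := "0123456789ABCDEFGHIJKLMNOPQRSTUVWXYZ+"

-- ===== PORT A =====
def generate_check_digit (prescription_id : String) : String :=
  let formatted : List Char := (PySem.Str.replace prescription_id "-" "").toList
  let prescription_id_length : Nat := formatted.length
  let running_total : Int :=
    (PySem.List.enumerate formatted 0).foldl
      (fun acc p => acc + int36 p.2 * 2 ^ ((prescription_id_length : Int) - p.1).toNat) 0
  let check_value : Int := PySem.Int.mod (38 - PySem.Int.mod running_total 37) 37
  -- CHECK_DIGIT_VALUES[check_value]; check_value ∈ [0, 37) so the getD default is unreachable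
  let check_digit : Char := (PySem.List.pyGet? CHECK_DIGIT_VALUES.toList check_value).getD '0'
  String.ofList (prescription_id.toList ++ [check_digit])

-- ===== PORT B =====
def generate_check_digit_alt (prescription_id : String) : String :=
  let total : Int :=
    prescription_id.toList.foldl
      (fun total c => if c = '-' then total else PySem.Int.mod (total * 2 + int36 c) 37) 0
  let check_value : Int := PySem.Int.mod (38 - PySem.Int.mod (total * 2) 37) 37
  let check_digit : Char := (PySem.List.pyGet? CHECK_DIGIT_VALUES.toList check_value).getD '0'
  String.ofList (prescription_id.toList ++ [check_digit])

-- ===== PRECONDITION & SPEC =====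
-- Python's int(character, 36) raises ValueError on any character that is not a base-36
-- digit (0-9, a-z, A-Z); Pre_ admits exactly the strings of base-36 digits and '-'.
def Pre_generate_check_digit (prescription_id : String) : Prop :=
  prescription_id.toList.all
    (fun c => c = '-' ∨ ('0' ≤ c ∧ c ≤ '9') ∨ ('a' ≤ c ∧ c ≤ 'z') ∨ ('A' ≤ c ∧ c ≤ 'Z')) = true
instance (prescription_id : String) : Decidable (Pre_generate_check_digit prescription_id) := by unfold Pre_generate_check_digit; infer_instance

def pvWitness_generate_check_digit : String := "83C40E-A23E6F-23BC71"

def Spec_generate_check_digit (prescription_id : String) (out : String) : Prop := out = generate_check_digit_alt prescription_id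
instance (prescription_id : String) (out : String) : Decidable (Spec_generate_check_digit prescription_id out) := by unfold Spec_generate_check_digit; infer_instance

-- ===== CLAIM (what is proved, stated in full; the proofs are below) =====
def Claim_equal_generate_check_digit : Prop := ∀ (prescription_id : String), Dom_generate_check_digit prescription_id → Pre_generate_check_digit prescription_id → Spec_generate_check_digit prescription_id (generate_check_digit prescription_id)

-- ===== LEMMAS AND PROOFS =====

-- Horner evaluation in base 2 of the digit values, no modulus (proof-side only)
def pvPoly (l : List Char) (a : Int) : Int := l.foldl (fun a c => a * 2 + int36 c) a

theorem pvPoly_shift (l : List Char) (a : Int) :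
    pvPoly l a = a * 2 ^ l.length + pvPoly l 0 := by
  induction l generalizing a with
  | nil => simp [pvPoly]
  | cons c t ih =>
    have h1 : pvPoly (c :: t) a = pvPoly t (a * 2 + int36 c) := rfl
    have h2 : pvPoly (c :: t) 0 = pvPoly t (0 * 2 + int36 c) := rfl
    rw [h1, h2, ih (a * 2 + int36 c), ih (0 * 2 + int36 c)]
    simp [pow_succ]; ring

-- A's enumerate/power loop computes 2^(n+1-(s+|l|)) · pvPoly l 0 (plus the accumulator)
theorem pvALoop (l : List Char) : ∀ (s : Nat) (acc : Int) (n : Nat), s + l.length ≤ n →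
    (PySem.List.enumerate l (s : Int)).foldl
      (fun acc p => acc + int36 p.2 * 2 ^ ((n : Int) - p.1).toNat) acc
      = acc + 2 ^ (n + 1 - (s + l.length)) * pvPoly l 0 := by
  induction l with
  | nil => intro s acc n h; simp [PySem.List.enumerate_nil, pvPoly]
  | cons c t ih =>
    intro s acc n h
    rw [PySem.List.enumerate_cons]
    show (PySem.List.enumerate t ((s : Int) + 1)).foldl _
        (acc + int36 c * 2 ^ ((n : Int) - (s : Int)).toNat) = _
    have hc : ((s : Int) + 1) = ((s + 1 : Nat) : Int) := by push_cast; ring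
    rw [hc, ih (s + 1) _ n (by simp at h ⊢; omega)]
    have h1 : ((n : Int) - (s : Int)).toNat = n - s := by omega
    have h2 : pvPoly (c :: t) 0 = int36 c * 2 ^ t.length + pvPoly t 0 := by
      show pvPoly t (0 * 2 + int36 c) = _
      rw [pvPoly_shift t (0 * 2 + int36 c)]; ring
    have h3 : n + 1 - (s + (c :: t).length) = n - s - t.length := by
      simp; omega
    have h4 : (n - s - t.length) + t.length = n - s := by
      simp at h; omega
    rw [h1, h2, h3]
    have h5 : (2 : Int) ^ (n - s) = 2 ^ (n - s - t.length) * 2 ^ t.length := by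
      rw [← pow_add, h4]
    have h6 : n + 1 - (s + 1 + t.length) = n - s - t.length := by simp at h; omega
    rw [h6, h5]; ring

-- B's loop is pvPoly reduced mod 37 at every step
theorem pvBLoop (l : List Char) : ∀ (a : Int),
    l.foldl (fun total c => PySem.Int.mod (total * 2 + int36 c) 37) (PySem.Int.mod a 37)
      = PySem.Int.mod (pvPoly l a) 37 := by
  induction l with
  | nil => intro a; simp [pvPoly]
  | cons c t ih =>
    intro a
    show t.foldl _ (PySem.Int.mod (PySem.Int.mod a 37 * 2 + int36 c) 37) = _
    have h : PySem.Int.mod (PySem.Int.mod a 37 * 2 + int36 c) 37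
        = PySem.Int.mod (a * 2 + int36 c) 37 := by
      simp only [PySem.Int.mod_eq_emod_of_pos (by norm_num : (0:Int) < 37)]
      omega
    have hp : pvPoly (c :: t) a = pvPoly t (a * 2 + int36 c) := rfl
    rw [h, hp]
    exact ih (a * 2 + int36 c)

-- B's if-guarded fold over the raw string is the plain fold over the '-'-filtered string
theorem pvBFilter (l : List Char) : ∀ (a : Int),
    l.foldl (fun total c => if c = '-' then total else PySem.Int.mod (total * 2 + int36 c) 37) a
      = (l.filter (fun c => !(c == '-'))).foldl
          (fun total c => PySem.Int.mod (total * 2 + int36 c) 37) a := by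
  induction l with
  | nil => intro a; rfl
  | cons c t ih =>
    intro a
    by_cases hc : c = '-'
    · subst hc
      rw [List.foldl_cons, if_pos rfl, List.filter_cons_of_neg (by simp)]
      exact ih a
    · rw [List.foldl_cons, if_neg hc, List.filter_cons_of_pos (by simp [hc])]
      exact ih _

-- str.replace(s, "-", "") removes exactly the '-' characters
theorem pvGoFilter : ∀ (fuel : Nat) (l acc : List Char), l.length ≤ fuel →
    PySem.Chars.replace.go ['-'] [] fuel l acc = acc.reverse ++ l.filter (fun c => !(c == '-')) := by
  intro fuel
  induction fuel with
  | zero => intro l acc h; simp at h; subst h; simp [PySem.Chars.replace.go]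
  | succ n ih =>
    intro l acc h
    cases l with
    | nil => simp [PySem.Chars.replace.go]
    | cons c t =>
      rw [PySem.Chars.replace.go]
      have hp : List.isPrefixOf ['-'] (c :: t) = (c == '-') := by
        simp [List.isPrefixOf]; exact eq_comm
      rw [hp]
      by_cases hc : c = '-'
      · subst hc
        simp only [beq_self_eq_true, if_true, List.reverse_nil, List.nil_append,
          List.length_cons, List.length_nil, List.drop_succ_cons, List.drop_zero]
        rw [ih t acc (by simpa using h)]
        simp
      · simp only [beq_iff_eq, hc, if_false]
        rw [ih t (c :: acc) (by simpa using h)]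
        simp [hc]

theorem pvReplaceFilter (s : List Char) :
    PySem.Chars.replace s ['-'] [] = s.filter (fun c => !(c == '-')) := by
  rw [PySem.Chars.replace]
  simp [pvGoFilter s.length s [] le_rfl]

-- ===== VERDICT (by name: the statement is the Claim_ definition above) =====
theorem generate_check_digit_spec : Claim_equal_generate_check_digit := by
  intro s _ _
  show generate_check_digit s = generate_check_digit_alt s
  unfold generate_check_digit generate_check_digit_alt
  have hrep : (PySem.Str.replace s "-" "").toList = s.toList.filter (fun c => !(c == '-')) := by
    rw [PySem.Str.toList_replace]
    exact pvReplaceFilter s.toList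
  set l := s.toList.filter (fun c => !(c == '-')) with hl
  rw [hrep]
  -- A's running total = 2 · pvPoly l 0
  have hA : (PySem.List.enumerate l ((0 : Nat) : Int)).foldl
      (fun acc p => acc + int36 p.2 * 2 ^ ((l.length : Int) - p.1).toNat) 0
      = 0 + 2 ^ (l.length + 1 - (0 + l.length)) * pvPoly l 0 :=
    pvALoop l 0 0 l.length (by omega)
  have hA' : (PySem.List.enumerate l (0 : Int)).foldl
      (fun acc p => acc + int36 p.2 * 2 ^ ((l.length : Int) - p.1).toNat) 0
      = 2 * pvPoly l 0 := by
    have : l.length + 1 - (0 + l.length) = 1 := by omega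
    simpa [this] using hA
  -- B's total = pvPoly l 0 mod 37
  have hB : s.toList.foldl
      (fun total c => if c = '-' then total else PySem.Int.mod (total * 2 + int36 c) 37) 0
      = PySem.Int.mod (pvPoly l 0) 37 := by
    have h37 : PySem.Int.mod (0 : Int) 37 = 0 := rfl
    have hbl := pvBLoop l 0
    rw [h37] at hbl
    rw [pvBFilter, ← hl, hbl]
  simp only [hB, hA']
  -- both check values coincide: (38 - (2P) mod 37) mod 37 = (38 - ((P mod 37)·2) mod 37) mod 37
  have hkey : PySem.Int.mod (38 - PySem.Int.mod (2 * pvPoly l 0) 37) 37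
      = PySem.Int.mod (38 - PySem.Int.mod (PySem.Int.mod (pvPoly l 0) 37 * 2) 37) 37 := by
    simp only [PySem.Int.mod_eq_emod_of_pos (by norm_num : (0:Int) < 37)]
    omega
  rw [hkey]
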